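-- pv_equiv track=rewrite | github.com/renjeff/redmule | golden-model/MX/gen_mx_test_vectors.py | pad_exponents_to_64_bytes
-- ===== SOURCE A (Python) =====
-- def pad_exponents_to_64_bytes(exp_blocks):
--     """Pad exponents to match hardware memory layout: 2 exponents per 64-byte block.
--
--     Hardware extracts 2 exponents per TCDM beat (64 bytes), so we pad:
--     [exp0, exp1, 0x00...00 (62 bytes)], [exp2, exp3, 0x00...00 (62 bytes)], ...
--
--     This creates proper rate matching: 1 TCDM beat = 2 exponents = 2 MX blocks.
--     """
--     padded = []
--     for i in range(0, len(exp_blocks), 2):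
--         # Get 2 exponents (or pad if odd number)
--         exp0 = exp_blocks[i] if i < len(exp_blocks) else 0
--         exp1 = exp_blocks[i+1] if i+1 < len(exp_blocks) else 0
--
--         # Create 64-byte block: [exp0, exp1, 62 bytes of padding]
--         padded.append(exp0)
--         padded.append(exp1)
--         padded.extend([0] * 62)  # 62 bytes of padding
--
--     return padded
-- ===== SOURCE B (Python) =====
-- def pad_exponents_to_64_bytes(exp_blocks):
--     """Pad exponents to match hardware memory layout: 2 exponents per 64-byte block.
--
--     Scatter form: preallocate all blocks as zeros (which is exactly the padding),
--     then write each exponent into slot j%2 of pair j//2.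
--     """
--     num_pairs = (len(exp_blocks) + 1) // 2
--     result = [0] * (num_pairs * 64)
--     j = 0
--     for v in exp_blocks:
--         result[(j // 2) * 64 + (j % 2)] = v
--         j += 1
--     return result
-- ===== Notes on version B (the rewrite author's own statement) =====
-- stated objective: alternative
-- what changed: Instead of walking pair indices and growing the output by appending exp0, exp1 and 62 zeros per pair, B preallocates a zero array of num_pairs*64 (the padding comes for free) and scatters each exponent into position (j//2)*64 + j%2 in one pass over the elements.
import Mathlib
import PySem

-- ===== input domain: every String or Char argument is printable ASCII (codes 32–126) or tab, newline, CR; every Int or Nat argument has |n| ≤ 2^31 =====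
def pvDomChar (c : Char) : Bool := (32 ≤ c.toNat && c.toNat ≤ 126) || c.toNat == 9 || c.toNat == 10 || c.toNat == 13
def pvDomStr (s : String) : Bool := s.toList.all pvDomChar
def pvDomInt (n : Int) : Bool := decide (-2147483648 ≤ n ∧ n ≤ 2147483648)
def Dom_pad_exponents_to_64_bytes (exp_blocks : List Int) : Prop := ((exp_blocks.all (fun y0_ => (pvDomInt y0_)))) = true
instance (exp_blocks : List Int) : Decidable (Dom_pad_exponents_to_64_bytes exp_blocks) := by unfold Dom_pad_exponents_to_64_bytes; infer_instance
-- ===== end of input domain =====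

-- B preallocates a zero array of num_pairs*64 and scatters each exponent into its
-- slot, instead of appending [exp0, exp1, 62 zeros] per pair (objective: alternative).


-- ===== PORT A =====
-- for i in range(0, len, 2): append exp0, exp1 (guarded reads, 0 past the end), 62 zeros
def pad_exponents_to_64_bytes (exp_blocks : List Int) : List Int :=
  (PySem.List.pyRange 0 (exp_blocks.length : Int) 2).foldl
    (fun padded i =>
      let exp0 : Int := if i < (exp_blocks.length : Int) then PySem.List.pyGetD exp_blocks i 0 else 0
      let exp1 : Int := if i + 1 < (exp_blocks.length : Int) then PySem.List.pyGetD exp_blocks (i + 1) 0 else 0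
      padded ++ ([exp0, exp1] ++ List.replicate 62 0))
    []

-- ===== PORT B =====
-- result = [0]*(num_pairs*64); for v in exp_blocks: result[(j//2)*64 + j%2] = v; j += 1
-- (j counts from 0, so it is a Nat; Python's // and % on nonnegative ints agree with Nat / and %)
def pad_exponents_to_64_bytes_alt (exp_blocks : List Int) : List Int :=
  let numPairs : Nat := (exp_blocks.length + 1) / 2
  let result : List Int := List.replicate (numPairs * 64) 0
  (exp_blocks.foldl
    (fun (s : Nat × List Int) v => (s.1 + 1, s.2.set ((s.1 / 2) * 64 + s.1 % 2) v))
    (0, result)).2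

-- ===== PRECONDITION & SPEC =====
def Spec_pad_exponents_to_64_bytes (exp_blocks : List Int) (out : List Int) : Prop := out = pad_exponents_to_64_bytes_alt exp_blocks
instance (exp_blocks : List Int) (out : List Int) : Decidable (Spec_pad_exponents_to_64_bytes exp_blocks out) := by unfold Spec_pad_exponents_to_64_bytes; infer_instance

-- ===== CLAIM (what is proved, stated in full; the proofs are below) =====
def Claim_equal_pad_exponents_to_64_bytes : Prop := ∀ (exp_blocks : List Int), Dom_pad_exponents_to_64_bytes exp_blocks → Spec_pad_exponents_to_64_bytes exp_blocks (pad_exponents_to_64_bytes exp_blocks)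

-- ===== LEMMAS AND PROOFS =====

-- common spec: blocks of [e0, e1, 62 zeros], two exponents per block
def pvPads : List Int → List Int
  | [] => []
  | [x] => [x, 0] ++ List.replicate 62 0
  | x :: y :: r => [x, y] ++ List.replicate 62 0 ++ pvPads r

-- the element-indexed block A emits for pair index k (Nat form)
def pvBlk (l : List Int) (k : Nat) : List Int :=
  [if 2 * k < l.length then l.getD (2 * k) 0 else 0,
   if 2 * k + 1 < l.length then l.getD (2 * k + 1) 0 else 0] ++ List.replicate 62 0

lemma pvFlat_eq (l : List Int) :
    (List.range ((l.length + 1) / 2)).flatMap (pvBlk l) = pvPads l := by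
  induction l using pvPads.induct with
  | case1 => simp [pvPads]
  | case2 x => simp [pvPads, pvBlk]
  | case3 x y r ih =>
    have hp : ((x :: y :: r).length + 1) / 2 = (r.length + 1) / 2 + 1 := by
      simp; omega
    rw [hp, List.range_succ_eq_map, List.flatMap_cons, List.flatMap_map]
    have hblk : ∀ k : Nat, pvBlk (x :: y :: r) k.succ = pvBlk r k := by
      intro k
      simp only [pvBlk, Nat.succ_eq_add_one, List.length_cons,
        show 2 * (k + 1) = (2 * k + 1) + 1 by omega,
        List.getD_cons_succ]
      have c1 : (2 * k + 1 + 1 < r.length + 1 + 1) ↔ (2 * k < r.length) := by omega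
      have c2 : (2 * k + 1 + 1 + 1 < r.length + 1 + 1) ↔ (2 * k + 1 < r.length) := by omega
      simp only [c1, c2]
    have hmap : (List.range ((r.length + 1) / 2)).flatMap (fun a => pvBlk (x :: y :: r) a.succ)
        = (List.range ((r.length + 1) / 2)).flatMap (pvBlk r) := by
      congr 1; funext k; exact hblk k
    rw [hmap, ih]
    simp [pvPads, pvBlk]

lemma pvA_eq (l : List Int) : pad_exponents_to_64_bytes l = pvPads l := by
  rw [← pvFlat_eq]
  unfold pad_exponents_to_64_bytes
  rw [PySem.List.foldl_append_eq_flatMap, List.nil_append]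
  rw [PySem.List.pyRange_of_pos 0 (l.length : Int) (by norm_num), List.flatMap_map]
  have hcnt : (if (0 : Int) < (l.length : Int) then ((((l.length : Int) - 0 + 2 - 1)) / 2).toNat else 0)
      = (l.length + 1) / 2 := by
    split <;> omega
  rw [hcnt]
  congr 1
  funext k
  simp only [pvBlk, Int.zero_add]
  rw [PySem.List.pyGetD_of_nonneg l 0 (by positivity),
      PySem.List.pyGetD_of_nonneg l 0 (by positivity)]
  have t0 : ((2 : Int) * (k : Int)).toNat = 2 * k := by omega
  have t1 : ((2 : Int) * (k : Int) + 1).toNat = 2 * k + 1 := by omega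
  have c0 : ((2 : Int) * (k : Int) < (l.length : Int)) ↔ 2 * k < l.length := by omega
  have c1 : ((2 : Int) * (k : Int) + 1 < (l.length : Int)) ↔ 2 * k + 1 < l.length := by omega
  simp only [t0, t1, c0, c1]

-- B's scatter loop over a split accumulator: an already-filled 64*p prefix is inert
lemma pvB_shift (l : List Int) : ∀ (j p : Nat) (pre acc : List Int), pre.length = 64 * p →
    (l.foldl (fun (s : Nat × List Int) v => (s.1 + 1, s.2.set ((s.1 / 2) * 64 + s.1 % 2) v))
      (2 * p + j, pre ++ acc)).2
    = pre ++ (l.foldl (fun (s : Nat × List Int) v => (s.1 + 1, s.2.set ((s.1 / 2) * 64 + s.1 % 2) v))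
      (j, acc)).2 := by
  induction l with
  | nil => intro j p pre acc hp; simp
  | cons v r ih =>
    intro j p pre acc hp
    simp only [List.foldl_cons]
    have hidx : ((2 * p + j) / 2) * 64 + (2 * p + j) % 2 = pre.length + ((j / 2) * 64 + j % 2) := by
      omega
    have hset : (pre ++ acc).set ((2 * p + j) / 2 * 64 + (2 * p + j) % 2) v
        = pre ++ acc.set ((j / 2) * 64 + j % 2) v := by
      rw [hidx]; simp
    rw [hset, show 2 * p + j + 1 = 2 * p + (j + 1) by omega]
    exact ih (j + 1) p pre _ hp

lemma pvB_run (l : List Int) :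
    (l.foldl (fun (s : Nat × List Int) v => (s.1 + 1, s.2.set ((s.1 / 2) * 64 + s.1 % 2) v))
      (0, List.replicate (((l.length + 1) / 2) * 64) 0)).2 = pvPads l := by
  induction l using pvPads.induct with
  | case1 => simp [pvPads]
  | case2 x =>
    norm_num [List.foldl_cons]
    rw [show (List.replicate 64 (0 : Int)) = 0 :: 0 :: List.replicate 62 0 from rfl]
    simp [pvPads]
  | case3 x y r ih =>
    have hp : (((x :: y :: r).length + 1) / 2) * 64 = 64 + ((r.length + 1) / 2) * 64 := by
      simp; omega
    rw [hp, List.replicate_add]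
    simp only [List.foldl_cons]
    have hset : (((List.replicate 64 (0 : Int) ++ List.replicate (((r.length + 1) / 2) * 64) 0).set
          ((0 / 2) * 64 + 0 % 2) x).set ((1 / 2) * 64 + 1 % 2) y)
        = (([x, y] ++ List.replicate 62 0) ++ List.replicate (((r.length + 1) / 2) * 64) 0) := by
      simp only [List.set_append, List.length_replicate]
      norm_num
      rw [show (List.replicate 64 (0 : Int)) = 0 :: 0 :: List.replicate 62 0 from rfl]
      simp [List.replicate_add]
    rw [hset]
    have h2 := pvB_shift r 0 1 ([x, y] ++ List.replicate 62 0)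
      (List.replicate (((r.length + 1) / 2) * 64) 0) (by simp)
    simp only [Nat.reduceMul, Nat.reduceAdd] at h2 ⊢
    rw [h2, ih]
    simp [pvPads]

lemma pvB_eq (l : List Int) : pad_exponents_to_64_bytes_alt l = pvPads l := pvB_run l

-- ===== VERDICT (by name: the statement is the Claim_ definition above) =====
theorem pad_exponents_to_64_bytes_spec : Claim_equal_pad_exponents_to_64_bytes := by
  intro l _
  unfold Spec_pad_exponents_to_64_bytes
  rw [pvA_eq, pvB_eq]
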